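-- pv_equiv track=rewrite | github.com/iamjohnnym/advent-of-code | day_2/run.py | compare_checksum
-- ===== SOURCE A (Python) =====
-- def compare_checksum(checksum_one, checksum_two):
--     """
--     >>> compare_checksum('fghij', 'fguij')
--     'fgij'
--     >>> compare_checksum('fghije', 'fguija')
--     ''
--     """
--     difference = 0
--     stripped_checksum = ""
--     for x, y in zip(checksum_one, checksum_two):
--         if x != y:
--             difference += 1
--         else:
--             stripped_checksum += x
--         if difference > 1:
--             return ''
--     return stripped_checksum
-- ===== SOURCE B (Python) =====
-- def compare_checksum(checksum_one, checksum_two):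
--     n = min(len(checksum_one), len(checksum_two))
--     i = 0
--     while i < n and checksum_one[i] == checksum_two[i]:
--         i += 1
--     if i == n:
--         return checksum_one[:n]
--     if checksum_one[i+1:n] == checksum_two[i+1:n]:
--         return checksum_one[:i] + checksum_one[i+1:n]
--     return ''
-- ===== Notes on version B (the rewrite author's own statement) =====
-- stated objective: alternative
-- what changed: Instead of counting mismatches in a loop, B scans to the FIRST differing position and then decides by a single slice equality of the remaining suffixes, building the result from two slices.
import Mathlib
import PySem

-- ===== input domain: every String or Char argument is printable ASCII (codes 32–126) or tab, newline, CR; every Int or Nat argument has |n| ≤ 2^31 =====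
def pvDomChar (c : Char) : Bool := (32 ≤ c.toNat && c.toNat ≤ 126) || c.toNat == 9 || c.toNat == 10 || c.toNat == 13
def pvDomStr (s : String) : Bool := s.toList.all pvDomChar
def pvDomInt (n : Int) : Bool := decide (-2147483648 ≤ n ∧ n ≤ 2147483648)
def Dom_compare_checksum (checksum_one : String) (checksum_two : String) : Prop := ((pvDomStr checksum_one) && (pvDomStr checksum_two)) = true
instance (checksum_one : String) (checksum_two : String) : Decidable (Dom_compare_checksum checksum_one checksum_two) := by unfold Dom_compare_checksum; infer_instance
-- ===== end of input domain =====

-- B replaces A's mismatch-counting loop by a different strategy: find the FIRST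
-- differing position, then decide by one slice comparison of the suffixes after it;
-- same return value, no speed claim.
-- ===== PORT A =====
-- A's loop: state = (difference, stripped_checksum); 'return ""' when difference > 1
def pvGoA : List (Char × Char) → Int → List Char → String
  | [], _, acc => String.ofList acc
  | (x, y) :: rest, diff, acc =>
    let diff' := if x ≠ y then diff + 1 else diff
    let acc' := if x ≠ y then acc else acc ++ [x]
    if diff' > 1 then "" else pvGoA rest diff' acc'

def compare_checksum (checksum_one : String) (checksum_two : String) : String :=
  pvGoA (List.zip checksum_one.toList checksum_two.toList) 0 []

-- ===== PORT B =====
-- B's while loop 'while i < n and a[i] == b[i]: i += 1' as structural recursion: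
-- index of the first differing position (min length if none within the common prefix)
def pvFirstDiff : List Char → List Char → Nat
  | x :: xs, y :: ys => if x = y then pvFirstDiff xs ys + 1 else 0
  | _, _ => 0

-- slices a[:n], a[i+1:n] are in-range nonnegative slices, exactly take/drop here
def compare_checksum_alt (checksum_one : String) (checksum_two : String) : String :=
  let a := checksum_one.toList
  let b := checksum_two.toList
  let n := min a.length b.length
  let i := pvFirstDiff a b
  if i = n then String.ofList (a.take n)
  else if (a.drop (i+1)).take (n - (i+1)) = (b.drop (i+1)).take (n - (i+1)) then
    String.ofList (a.take i ++ (a.drop (i+1)).take (n - (i+1)))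
  else ""

-- ===== PRECONDITION & SPEC =====
def Spec_compare_checksum (checksum_one : String) (checksum_two : String) (out : String) : Prop := out = compare_checksum_alt checksum_one checksum_two
instance (checksum_one : String) (checksum_two : String) (out : String) : Decidable (Spec_compare_checksum checksum_one checksum_two out) := by unfold Spec_compare_checksum; infer_instance

-- ===== CLAIM (what is proved, stated in full; the proofs are below) =====
def Claim_equal_compare_checksum : Prop := ∀ (checksum_one : String) (checksum_two : String), Dom_compare_checksum checksum_one checksum_two → Spec_compare_checksum checksum_one checksum_two (compare_checksum checksum_one checksum_two)

-- ===== LEMMAS AND PROOFS =====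

-- number of differing zipped positions / the matching characters
def pvCnt (a b : List Char) : Nat := ((a.zip b).filter (fun p => !decide (p.1 = p.2))).length
def pvMatches (a b : List Char) : List Char := ((a.zip b).filter (fun p => decide (p.1 = p.2))).map Prod.fst

theorem pvMinSucc (m n : Nat) : min (m + 1) (n + 1) = min m n + 1 := by omega

-- invariant of A's loop: with diff ≤ 1, the result is "" iff the total mismatch
-- count pushes diff past 1, otherwise acc followed by the matching characters
theorem pvGoA_eq (ps : List (Char × Char)) : ∀ (diff : Int) (acc : List Char), diff ≤ 1 →
    pvGoA ps diff acc =
      (if diff + ((ps.filter (fun p => !decide (p.1 = p.2))).length : Int) > 1 then ""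
       else String.ofList (acc ++ (ps.filter (fun p => p.1 = p.2)).map Prod.fst)) := by
  induction ps with
  | nil => intro diff acc h; simp [pvGoA]; omega
  | cons p rest ih =>
    intro diff acc h
    obtain ⟨x, y⟩ := p
    simp only [pvGoA, List.filter_cons, ne_eq]
    by_cases hxy : x = y
    · subst hxy
      simp only [decide_true, Bool.not_true, Bool.false_eq_true, if_false, if_true,
        not_true_eq_false]
      rw [if_neg (by omega), ih diff (acc ++ [x]) h]
      simp
    · simp only [hxy, decide_false, Bool.not_false, Bool.false_eq_true, if_true, if_false,
        not_false_eq_true]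
      by_cases hd : diff + 1 > 1
      · rw [if_pos hd, if_pos (by simp only [List.length_cons]; push_cast; omega)]
      · rw [if_neg hd, ih (diff + 1) acc (by omega)]
        simp only [List.length_cons]
        congr 2
        push_cast
        omega

-- map fst of a zip is the first list truncated to the common length
theorem pvMapFstZip (a : List Char) : ∀ b : List Char,
    (a.zip b).map Prod.fst = a.take (min a.length b.length) := by
  induction a with
  | nil => intro b; simp
  | cons x xs ih =>
    intro b
    cases b with
    | nil => simp
    | cons y ys => simp [List.zip_cons_cons, ih ys, pvMinSucc, List.take_succ_cons]

-- equality of the common-length truncations ↔ no mismatching zipped position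
theorem pvTakeMinEq (a : List Char) : ∀ b : List Char,
    (a.take (min a.length b.length) = b.take (min a.length b.length)) ↔ pvCnt a b = 0 := by
  induction a with
  | nil => intro b; simp [pvCnt]
  | cons x xs ih =>
    intro b
    cases b with
    | nil => simp [pvCnt]
    | cons y ys =>
      simp only [pvCnt, List.zip_cons_cons, List.filter_cons, List.length_cons,
        pvMinSucc] at *
      by_cases hxy : x = y
      · subst hxy
        simpa [List.take_succ_cons] using ih ys
      · simp [hxy, List.take_succ_cons]

-- the first differing position equals the common length ↔ no mismatch at all
theorem pvFirstDiff_eq_min (a : List Char) : ∀ b : List Char,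
    (pvFirstDiff a b = min a.length b.length) ↔ pvCnt a b = 0 := by
  induction a with
  | nil => intro b; simp [pvFirstDiff, pvCnt]
  | cons x xs ih =>
    intro b
    cases b with
    | nil => simp [pvFirstDiff, pvCnt]
    | cons y ys =>
      simp only [pvCnt, List.zip_cons_cons, List.filter_cons, List.length_cons,
        pvMinSucc, pvFirstDiff]
      by_cases hxy : x = y
      · subst hxy; simpa [pvCnt] using ih ys
      · simp [hxy]

-- B's slice test: suffixes after the first differing position agree ↔ at most one mismatch
theorem pvSliceIff (a : List Char) : ∀ b : List Char,
    ((a.drop (pvFirstDiff a b + 1)).take (min a.length b.length - (pvFirstDiff a b + 1)) =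
      (b.drop (pvFirstDiff a b + 1)).take (min a.length b.length - (pvFirstDiff a b + 1)))
      ↔ pvCnt a b ≤ 1 := by
  induction a with
  | nil => intro b; simp [pvFirstDiff, pvCnt]
  | cons x xs ih =>
    intro b
    cases b with
    | nil => simp [pvFirstDiff, pvCnt]
    | cons y ys =>
      by_cases hxy : x = y
      · subst hxy
        simp only [pvFirstDiff, eq_self_iff_true, if_true, pvCnt, List.zip_cons_cons, List.filter_cons,
          decide_true, Bool.not_true, Bool.false_eq_true, if_false, List.length_cons,
          pvMinSucc]
        have : min xs.length ys.length + 1 - (pvFirstDiff xs ys + 1 + 1)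
            = min xs.length ys.length - (pvFirstDiff xs ys + 1) := by omega
        rw [this]
        simpa [List.drop_succ_cons, pvCnt] using ih ys
      · simp only [pvFirstDiff, hxy, if_false, if_true, pvCnt, List.zip_cons_cons,
          List.filter_cons, decide_false, Bool.not_false, List.length_cons,
          pvMinSucc, List.drop_succ_cons]
        have : min xs.length ys.length + 1 - (0 + 1) = min xs.length ys.length := by omega
        rw [this]
        constructor
        · intro h
          have := (pvTakeMinEq xs ys).mp h
          simp only [pvCnt] at this
          omega
        · intro h
          have h0 : pvCnt xs ys = 0 := by simp [pvCnt] at h ⊢; omega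
          exact (pvTakeMinEq xs ys).mpr h0

-- with at most one mismatch, B returns exactly the matching characters
theorem pvBody_good (a : List Char) : ∀ b : List Char, pvCnt a b ≤ 1 →
    compare_checksum_alt (String.ofList a) (String.ofList b) = String.ofList (pvMatches a b) := by
  induction a with
  | nil => intro b _; simp [compare_checksum_alt, pvFirstDiff, pvMatches]
  | cons x xs ih =>
    intro b hc
    cases b with
    | nil => simp [compare_checksum_alt, pvFirstDiff, pvMatches]
    | cons y ys =>
      by_cases hxy : x = y
      · subst hxy
        have hc' : pvCnt xs ys ≤ 1 := by
          simpa [pvCnt, List.filter_cons] using hc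
        have := ih ys hc'
        simp only [compare_checksum_alt, String.toList_ofList] at this ⊢
        simp only [pvFirstDiff, eq_self_iff_true, if_true, List.length_cons, pvMinSucc,
          pvMatches, List.zip_cons_cons, List.filter_cons, decide_true,
          List.map_cons] at *
        by_cases hmin : pvFirstDiff xs ys = min xs.length ys.length
        · rw [if_pos (by omega)] at this ⊢
          rw [List.take_succ_cons]
          have hmatch : xs.take (min xs.length ys.length)
              = (List.filter (fun p => decide (p.1 = p.2)) (xs.zip ys)).map Prod.fst := by
            have := congrArg String.toList this
            simpa using this
          rw [hmatch]
        · rw [if_neg (by omega)] at this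
          rw [if_neg (by omega)]
          have hC : (xs.drop (pvFirstDiff xs ys + 1)).take
                (min xs.length ys.length - (pvFirstDiff xs ys + 1)) =
              (ys.drop (pvFirstDiff xs ys + 1)).take
                (min xs.length ys.length - (pvFirstDiff xs ys + 1)) :=
            (pvSliceIff xs ys).mpr hc'
          rw [if_pos hC] at this
          have harith : min xs.length ys.length + 1 - (pvFirstDiff xs ys + 1 + 1)
              = min xs.length ys.length - (pvFirstDiff xs ys + 1) := by omega
          rw [if_pos (by rw [List.drop_succ_cons, List.drop_succ_cons, harith]; exact hC)]
          rw [List.drop_succ_cons, harith, List.take_succ_cons]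
          have hmatch := congrArg String.toList this
          simp only [String.toList_ofList] at hmatch
          rw [List.cons_append, hmatch]
      · -- first mismatch at position 0: at most one mismatch forces the suffixes equal
        have hc0 : pvCnt xs ys = 0 := by
          simp [pvCnt, List.filter_cons, hxy] at hc ⊢
          omega
        simp only [compare_checksum_alt, String.toList_ofList, pvFirstDiff, hxy,
          List.length_cons, pvMinSucc, pvMatches, List.zip_cons_cons,
          List.filter_cons, decide_false, Bool.false_eq_true, if_false]
        rw [if_neg (by omega)]
        have harith : min xs.length ys.length + 1 - (0 + 1) = min xs.length ys.length := by
          omega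
        have hC := (pvTakeMinEq xs ys).mpr hc0
        rw [if_pos (by rw [List.drop_succ_cons, List.drop_succ_cons, harith]; exact hC)]
        rw [List.drop_succ_cons, harith, List.take_zero, List.nil_append, List.drop_zero]
        congr 1
        have hall : ∀ p ∈ xs.zip ys, decide (p.1 = p.2) = true := by
          have : (xs.zip ys).filter (fun p => !decide (p.1 = p.2)) = [] := by
            simpa [pvCnt] using hc0
          intro p hp
          by_contra hne
          have : p ∈ (xs.zip ys).filter (fun p => !decide (p.1 = p.2)) :=
            List.mem_filter.mpr ⟨hp, by simp at hne ⊢; exact hne⟩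
          simp [‹(xs.zip ys).filter _ = []›] at this
        rw [List.filter_eq_self.mpr hall, pvMapFstZip]

-- with more than one mismatch, B returns ""
theorem pvBody_bad (a b : List Char) (hc : 1 < pvCnt a b) :
    compare_checksum_alt (String.ofList a) (String.ofList b) = "" := by
  simp only [compare_checksum_alt, String.toList_ofList]
  rw [if_neg (by
    intro h
    have := (pvFirstDiff_eq_min a b).mp h
    omega)]
  rw [if_neg (by
    intro h
    have := (pvSliceIff a b).mp h
    omega)]

-- ===== VERDICT (by name: the statement is the Claim_ definition above) =====
theorem compare_checksum_spec : Claim_equal_compare_checksum := by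
  intro c1 c2 _
  unfold Spec_compare_checksum
  have h1 : compare_checksum c1 c2 =
      (if (0 : Int) + ((( (c1.toList.zip c2.toList).filter (fun p => !decide (p.1 = p.2))).length : Int)) > 1 then ""
       else String.ofList ([] ++ ((c1.toList.zip c2.toList).filter (fun p => p.1 = p.2)).map Prod.fst)) := by
    unfold compare_checksum
    exact pvGoA_eq _ 0 [] (by norm_num)
  have hc12 : compare_checksum_alt c1 c2
      = compare_checksum_alt (String.ofList c1.toList) (String.ofList c2.toList) := by
    simp [compare_checksum_alt]
  by_cases hc : pvCnt c1.toList c2.toList ≤ 1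
  · rw [h1, if_neg (by simp only [pvCnt] at hc; push_cast; omega)]
    rw [hc12, pvBody_good _ _ hc]
    simp [pvMatches]
  · rw [h1, if_pos (by simp only [pvCnt] at hc; push_cast; omega)]
    rw [hc12, pvBody_bad _ _ (by omega)]
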